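-- pv_equiv track=rewrite | github.com/AntonioLonga/Master-thesis | Experiments/visualizator.py | balance_targhet_test
-- ===== SOURCE A (Python) =====
-- def balance_targhet_test(y_test):
--     '''Count the number of positive and negative targhets.
--
--     Args:
--         y_test([int]): list of test targhet
--
--     Return:
--         (y_balance): A pair (n_positive_semples, n_negative_samples)
--     '''
--
--     y_balance = [0,0]
--     for i in y_test:
--         if (i == 0):
--             y_balance[0] = y_balance[0] + 1
--         else:
--             y_balance[1] = y_balance[1] + 1
--
--     return(y_balance)
-- ===== SOURCE B (Python) =====
-- def balance_targhet_test(y_test):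
--     # Divide and conquer: split the list in half, count each half recursively,
--     # and merge the sub-counts by pairwise addition.
--     def go(seg):
--         if len(seg) == 0:
--             return [0, 0]
--         if len(seg) == 1:
--             return [1, 0] if seg[0] == 0 else [0, 1]
--         mid = len(seg) // 2
--         left = go(seg[:mid])
--         right = go(seg[mid:])
--         return [left[0] + right[0], left[1] + right[1]]
--     return go(y_test)
-- ===== Notes on version B (the rewrite author's own statement) =====
-- stated objective: alternative
-- what changed: Replaces the single-pass two-cell accumulator loop with a divide-and-conquer recursion that splits the list in half, counts each half recursively and merges the sub-counts by pairwise addition.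
import Mathlib
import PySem

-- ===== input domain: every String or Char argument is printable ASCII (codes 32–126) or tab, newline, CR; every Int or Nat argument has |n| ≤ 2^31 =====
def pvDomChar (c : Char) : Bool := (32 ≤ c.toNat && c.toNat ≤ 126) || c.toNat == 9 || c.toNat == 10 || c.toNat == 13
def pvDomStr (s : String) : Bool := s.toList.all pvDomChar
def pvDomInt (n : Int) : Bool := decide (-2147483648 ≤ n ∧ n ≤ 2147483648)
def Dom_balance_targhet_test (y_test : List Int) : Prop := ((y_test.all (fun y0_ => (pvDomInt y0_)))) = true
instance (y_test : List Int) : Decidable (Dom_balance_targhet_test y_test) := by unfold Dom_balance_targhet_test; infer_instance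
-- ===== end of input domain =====

-- B changes the decomposition: divide-and-conquer recursion merging sub-counts instead of A's single-pass two-cell accumulator loop (objective: alternative).

-- ===== PORT A =====
-- A: two-bin accumulator updated per element (Python's mutable [0,0] list as a pair of cells)
def balance_targhet_test (y_test : List Int) : List Int :=
  let yb := y_test.foldl (fun (yb : Int × Int) i =>
    if i = 0 then (yb.1 + 1, yb.2) else (yb.1, yb.2 + 1)) (0, 0)
  [yb.1, yb.2]

-- ===== PORT B =====
-- B's inner helper go (mid = len//2 on a nonnegative length, so Nat division is exact here): split in half, recurse on each half (seg[:mid] = take, seg[mid:] = drop), add sub-counts pairwise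
def btGo : List Int → Int × Int
  | [] => (0, 0)
  | [x] => if x = 0 then (1, 0) else (0, 1)
  | x :: y :: rest =>
    let l := x :: y :: rest
    let m := l.length / 2
    let left := btGo (l.take m)
    let right := btGo (l.drop m)
    (left.1 + right.1, left.2 + right.2)
termination_by l => l.length
decreasing_by
  · simp [List.length_take]; omega
  · simp [List.length_drop]; omega

def balance_targhet_test_alt (y_test : List Int) : List Int :=
  let p := btGo y_test
  [p.1, p.2]

-- ===== PRECONDITION & SPEC =====
def Spec_balance_targhet_test (y_test : List Int) (out : List Int) : Prop := out = balance_targhet_test_alt y_test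
instance (y_test : List Int) (out : List Int) : Decidable (Spec_balance_targhet_test y_test out) := by unfold Spec_balance_targhet_test; infer_instance

-- ===== CLAIM (what is proved, stated in full; the proofs are below) =====
def Claim_equal_balance_targhet_test : Prop := ∀ (y_test : List Int), Dom_balance_targhet_test y_test → Spec_balance_targhet_test y_test (balance_targhet_test y_test)

-- ===== LEMMAS AND PROOFS =====
theorem pv_fold_count (l : List Int) : ∀ (a b : Int),
    l.foldl (fun (yb : Int × Int) i =>
      if i = 0 then (yb.1 + 1, yb.2) else (yb.1, yb.2 + 1)) (a, b)
    = (a + (l.countP (fun i => i == 0) : Nat),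
       b + (l.countP (fun i => !(i == 0)) : Nat)) := by
  induction l with
  | nil => intro a b; simp
  | cons x xs ih =>
      intro a b
      simp only [List.foldl_cons, List.countP_cons]
      by_cases h : x = 0
      · simp [h, ih]; ring
      · simp [h, ih]; ring

theorem pv_btGo_count_aux : ∀ (n : Nat) (l : List Int), l.length ≤ n →
    btGo l = (((l.countP (fun i => i == 0) : Nat) : Int), ((l.countP (fun i => !(i == 0)) : Nat) : Int)) := by
  intro n
  induction n with
  | zero =>
      intro l hl
      have : l = [] := List.eq_nil_of_length_eq_zero (Nat.le_zero.mp hl)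
      subst this; simp [btGo]
  | succ n ih =>
      intro l hl
      match l with
      | [] => simp [btGo]
      | [x] => by_cases h : x = 0 <;> simp [btGo, h]
      | x :: y :: rest =>
        have hlen : 2 ≤ (x :: y :: rest).length := by simp
        have htake : ((x :: y :: rest).take ((x :: y :: rest).length / 2)).length ≤ n := by
          simp only [List.length_take]
          simp at hl ⊢; omega
        have hdrop : ((x :: y :: rest).drop ((x :: y :: rest).length / 2)).length ≤ n := by
          simp only [List.length_drop]
          simp at hl ⊢; omega
        rw [btGo]
        simp only [ih _ htake, ih _ hdrop]
        have hsplit := List.take_append_drop ((x :: y :: rest).length / 2) (x :: y :: rest)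
        have hz := congrArg (List.countP (fun i : Int => i == 0)) hsplit
        have hnz := congrArg (List.countP (fun i : Int => !(i == 0))) hsplit
        rw [List.countP_append] at hz hnz
        rw [Prod.mk.injEq]
        constructor
        · push_cast [← hz]; ring
        · push_cast [← hnz]; ring

theorem pv_btGo_count (l : List Int) :
    btGo l = (((l.countP (fun i => i == 0) : Nat) : Int), ((l.countP (fun i => !(i == 0)) : Nat) : Int)) :=
  pv_btGo_count_aux l.length l le_rfl

-- ===== VERDICT (by name: the statement is the Claim_ definition above) =====
theorem balance_targhet_test_spec : Claim_equal_balance_targhet_test := by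
  intro y_test _
  unfold Spec_balance_targhet_test balance_targhet_test balance_targhet_test_alt
  simp [pv_fold_count, pv_btGo_count]
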